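-- pv_equiv track=rewrite | github.com/seanszy/Encryption | RSA_Encryption.py | find_e
-- ===== SOURCE A (Python) =====
-- import math
--
-- def find_e(phi_public):
--     non_primes = set(j for i in range(2, 8) for j in range(i*2, 100, i))
--     primes = [x for x in range(2, 100) if x not in non_primes]
--     for prime in primes:
--         if math.gcd(phi_public, prime) is 1:
--             e = prime
--             break
--     return(e)
-- ===== SOURCE B (Python) =====
-- import math
--
-- def find_e(phi_public):
--     for n in range(2, 100):
--         if all(n % d != 0 for d in range(2, n) if d * d <= n):
--             if math.gcd(phi_public, n) == 1:
--                 e = n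
--                 break
--     return e
-- ===== Notes on version B (the rewrite author's own statement) =====
-- stated objective: simpler
-- what changed: Replaced A's precomputed sieve set and prime-list comprehension with a single pass over range(2,100) that tests each candidate's primality by trial division on the fly and breaks at the first prime coprime to phi_public.
-- outside the precondition, e.g. on find_e(0): A raises UnboundLocalError, B raises UnboundLocalError
import Mathlib
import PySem

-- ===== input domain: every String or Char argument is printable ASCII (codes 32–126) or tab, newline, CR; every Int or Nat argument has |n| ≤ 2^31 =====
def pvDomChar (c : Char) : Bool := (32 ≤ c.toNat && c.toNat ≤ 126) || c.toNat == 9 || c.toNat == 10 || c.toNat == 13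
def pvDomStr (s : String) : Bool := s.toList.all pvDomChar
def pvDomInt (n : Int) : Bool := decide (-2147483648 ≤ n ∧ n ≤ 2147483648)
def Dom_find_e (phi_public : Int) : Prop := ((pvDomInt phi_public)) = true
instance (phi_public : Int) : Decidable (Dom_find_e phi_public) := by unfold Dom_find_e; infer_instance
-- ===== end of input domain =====

-- B replaces A's sieve-built prime list with a single pass over range(2,100) that tests
-- primality by trial division on the fly (objective: simpler — no precomputed sieve set/list).

-- ===== PORT A =====
-- 'for prime in primes: if math.gcd(phi_public, prime) is 1: e = prime; break'
-- (gcd values here are ≤ 97, so CPython small-int caching makes 'is 1' behave as '== 1')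
def find_e_loop (phi_public : Int) : List Int → Option Int
  | [] => none
  | p :: rest => if Int.gcd phi_public p == 1 then some p else find_e_loop phi_public rest

def find_e (phi_public : Int) : Int :=
  let non_primes : PySem.Set Int :=
    PySem.Set.ofList ((PySem.List.pyRange 2 8 1).flatMap (fun i => PySem.List.pyRange (i*2) 100 i))
  let primes := (PySem.List.pyRange 2 100 1).filter (fun x => !(PySem.Set.contains non_primes x))
  -- 'return e': none = NameError ('e' never bound), excluded by Pre_find_e
  (find_e_loop phi_public primes).getD 0

-- ===== PORT B =====
-- 'all(n % d != 0 for d in range(2, n) if d * d <= n)'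
def find_e_alt_isPrime (n : Int) : Bool :=
  ((PySem.List.pyRange 2 n 1).filter (fun d => decide (d * d ≤ n))).all
    (fun d => !(PySem.Int.mod n d == 0))

def find_e_alt_loop (phi_public : Int) : List Int → Option Int
  | [] => none
  | n :: rest =>
    if find_e_alt_isPrime n then
      if Int.gcd phi_public n == 1 then some n else find_e_alt_loop phi_public rest
    else find_e_alt_loop phi_public rest

def find_e_alt (phi_public : Int) : Int :=
  -- none = NameError ('e' never bound), excluded by Pre_find_e
  (find_e_alt_loop phi_public (PySem.List.pyRange 2 100 1)).getD 0

-- ===== PRECONDITION & SPEC =====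
-- phi_public = 0 is the only domain input with no prime < 100 coprime to it
-- (gcd(0, p) = p ≠ 1), so both Pythons raise NameError there; Pre_ excludes it.
def Pre_find_e (phi_public : Int) : Prop := phi_public ≠ 0
instance (phi_public : Int) : Decidable (Pre_find_e phi_public) := by unfold Pre_find_e; infer_instance
def pvWitness_find_e : Int := (15)

def Spec_find_e (phi_public : Int) (out : Int) : Prop := out = find_e_alt phi_public
instance (phi_public : Int) (out : Int) : Decidable (Spec_find_e phi_public out) := by unfold Spec_find_e; infer_instance

-- ===== CLAIM (what is proved, stated in full; the proofs are below) =====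
def Claim_equal_find_e : Prop := ∀ (phi_public : Int), Dom_find_e phi_public → Pre_find_e phi_public → Spec_find_e phi_public (find_e phi_public)

-- ===== LEMMAS AND PROOFS =====

-- B's fused loop equals A's loop run over the pre-filtered list.
theorem alt_loop_eq_loop_filter (phi_public : Int) (l : List Int) :
    find_e_alt_loop phi_public l
      = find_e_loop phi_public (l.filter (fun n => find_e_alt_isPrime n)) := by
  induction l with
  | nil => rfl
  | cons n rest ih =>
    by_cases hp : find_e_alt_isPrime n
    · simp [find_e_alt_loop, hp, find_e_loop, ih]
    · simp [find_e_alt_loop, hp, ih]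

-- Trial division and A's sieve accept exactly the same numbers below 100.
set_option maxRecDepth 8000 in
theorem filter_lists_eq :
    (PySem.List.pyRange 2 100 1).filter (fun n => find_e_alt_isPrime n)
      = (PySem.List.pyRange 2 100 1).filter (fun x =>
          !(PySem.Set.contains
              (PySem.Set.ofList ((PySem.List.pyRange 2 8 1).flatMap
                (fun i => PySem.List.pyRange (i*2) 100 i))) x)) := by
  decide

-- ===== VERDICT (by name: the statement is the Claim_ definition above) =====
theorem find_e_spec : Claim_equal_find_e := by
  intro phi_public _hdom _hpre
  unfold Spec_find_e find_e find_e_alt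
  rw [alt_loop_eq_loop_filter, filter_lists_eq]
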